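-- pv_equiv track=rewrite | github.com/kitab-project-org/passim | scripts/seriatim.py | getPostings
-- ===== SOURCE A (Python) =====
-- def getPostings(text, n, floating_ngrams):
--     tf = dict()
--     posts = list()
--     for i, c in enumerate(text):
--         if c.isalnum() and ( floating_ngrams or i == 0 or not text[i-1].isalnum() ):
--             j = i + 1
--             buf = ''
--             while j < len(text) and len(buf) < n:
--                 if text[j].isalnum():
--                     buf += text[j].lower()
--                 j += 1
--             if len(buf) >= n:
--                 tf[buf] = tf.get(buf, 0) + 1
--                 posts.append((buf, i))
--     return [(key, tf[key], i) for key, i in posts]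
-- ===== SOURCE B (Python) =====
-- def getPostings(text, n, floating_ngrams):
--     # Precompute the alnum positions and the lowered alnum characters once; each
--     # n-gram is then a slice of the precomputed string instead of a rescan of the text.
--     idx = [i for i, c in enumerate(text) if c.isalnum()]
--     low = ''.join(c.lower() for c in text if c.isalnum())
--     m = max(n, 0)
--     tf = {}
--     posts = []
--     for k, i in enumerate(idx):
--         if floating_ngrams or k == 0 or idx[k - 1] != i - 1:
--             buf = low[k + 1:k + 1 + m]
--             if len(buf) >= n:
--                 tf[buf] = tf.get(buf, 0) + 1
--                 posts.append((buf, i))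
--     return [(key, tf[key], i) for key, i in posts]
-- ===== Notes on version B (the rewrite author's own statement) =====
-- stated objective: alternative
-- what changed: B precomputes the alnum-position list and the lowered-alnum string once, detects word starts by comparing adjacent precomputed positions, and takes each n-gram as a slice of the precomputed string, instead of A's inner while-loop that rescans the text (including non-alnum gaps) after every start position.
import Mathlib
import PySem

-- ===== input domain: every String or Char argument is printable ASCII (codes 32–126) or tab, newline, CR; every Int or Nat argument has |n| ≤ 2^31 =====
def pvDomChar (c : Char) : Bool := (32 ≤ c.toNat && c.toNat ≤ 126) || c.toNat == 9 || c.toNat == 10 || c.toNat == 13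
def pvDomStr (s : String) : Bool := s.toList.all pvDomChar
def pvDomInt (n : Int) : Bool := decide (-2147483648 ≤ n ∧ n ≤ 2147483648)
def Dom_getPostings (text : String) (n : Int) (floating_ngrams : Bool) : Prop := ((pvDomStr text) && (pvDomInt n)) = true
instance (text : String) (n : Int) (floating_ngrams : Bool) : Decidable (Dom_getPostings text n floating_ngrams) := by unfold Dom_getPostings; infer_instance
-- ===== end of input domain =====

-- B precomputes the alnum-position array and the lowered-alnum string once and takes each
-- n-gram as a slice of them, instead of A's per-start rescan of the text (objective: alternative).

-- ===== PORT A =====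
-- inner while loop of A: j walks the text from i+1, represented by the remaining suffix
def pvA_buf (n : Int) : List Char → List Char → List Char
  | [], buf => buf
  | c :: rs, buf =>
    if (buf.length : Int) < n then
      pvA_buf n rs (if PySem.Chars.isalnum c then buf ++ [PySem.Chars.lowerChar c] else buf)
    else buf

-- text[i-1].isalnum(); the pyGet? is only reached with 1 ≤ i < len(text), where it is some _
def pvA_prevAlnum (cs : List Char) (i : Int) : Bool :=
  match PySem.List.pyGet? cs (i - 1) with
  | some c => PySem.Chars.isalnum c
  | none => false

def pvA_loop (cs : List Char) (n : Int) (fl : Bool) :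
    List Char → Int → PySem.Dict String Int → List (String × Int) →
    PySem.Dict String Int × List (String × Int)
  | [], _, tf, posts => (tf, posts)
  | c :: rs, i, tf, posts =>
    if PySem.Chars.isalnum c && (fl || i == 0 || !(pvA_prevAlnum cs i)) then
      let bufL := pvA_buf n rs []
      if n ≤ (bufL.length : Int) then
        let key := String.ofList bufL
        pvA_loop cs n fl rs (i + 1) (tf.insert key (tf.getD key 0 + 1)) (posts ++ [(key, i)])
      else pvA_loop cs n fl rs (i + 1) tf posts
    else pvA_loop cs n fl rs (i + 1) tf posts

def getPostings (text : String) (n : Int) (floating_ngrams : Bool) : List (String × Int × Int) :=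
  let cs := text.toList
  let st := pvA_loop cs n floating_ngrams cs 0 PySem.Dict.empty []
  st.2.map (fun p => (p.1, st.1.getD p.1 0, p.2))   -- tf[key]: key is always present

-- ===== PORT B =====
-- for k, i in enumerate(idx): the rank k is an explicit counter; idx[k-1] is only compared when k > 0
def pvB_loop (idx : List Int) (low : List Char) (n : Int) (fl : Bool) :
    List Int → Nat → PySem.Dict String Int → List (String × Int) →
    PySem.Dict String Int × List (String × Int)
  | [], _, tf, posts => (tf, posts)
  | i :: rem, k, tf, posts =>
    if fl || k == 0 || !(PySem.List.pyGetD idx ((k : Int) - 1) 0 == i - 1) then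
      let bufL := PySem.List.slice low (some ((k : Int) + 1)) (some ((k : Int) + 1 + max n 0))
      if n ≤ (bufL.length : Int) then
        let key := String.ofList bufL
        pvB_loop idx low n fl rem (k + 1) (tf.insert key (tf.getD key 0 + 1)) (posts ++ [(key, i)])
      else pvB_loop idx low n fl rem (k + 1) tf posts
    else pvB_loop idx low n fl rem (k + 1) tf posts

def getPostings_alt (text : String) (n : Int) (floating_ngrams : Bool) : List (String × Int × Int) :=
  let cs := text.toList
  let idx := ((PySem.List.enumerate cs 0).filter (fun p => PySem.Chars.isalnum p.2)).map (·.1)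
  let low := (cs.filter (fun c => PySem.Chars.isalnum c)).map PySem.Chars.lowerChar
  let st := pvB_loop idx low n floating_ngrams idx 0 PySem.Dict.empty []
  st.2.map (fun p => (p.1, st.1.getD p.1 0, p.2))

-- ===== PRECONDITION & SPEC =====
def Spec_getPostings (text : String) (n : Int) (floating_ngrams : Bool) (out : List (String × Int × Int)) : Prop := out = getPostings_alt text n floating_ngrams
instance (text : String) (n : Int) (floating_ngrams : Bool) (out : List (String × Int × Int)) : Decidable (Spec_getPostings text n floating_ngrams out) := by unfold Spec_getPostings; infer_instance

-- ===== CLAIM (what is proved, stated in full; the proofs are below) =====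
def Claim_equal_getPostings : Prop := ∀ (text : String) (n : Int) (floating_ngrams : Bool), Dom_getPostings text n floating_ngrams → Spec_getPostings text n floating_ngrams (getPostings text n floating_ngrams)

-- ===== LEMMAS AND PROOFS =====

-- positions of the alnum chars of a suffix that starts at absolute position i
def pvPos (i : Int) : List Char → List Int
  | [] => []
  | c :: rs => if PySem.Chars.isalnum c then i :: pvPos (i + 1) rs else pvPos (i + 1) rs

-- lowered alnum chars
def pvLow (l : List Char) : List Char :=
  (l.filter (fun c => PySem.Chars.isalnum c)).map PySem.Chars.lowerChar

theorem pvA_buf_eq (n : Int) : ∀ (rest buf : List Char),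
    pvA_buf n rest buf = buf ++ (pvLow rest).take (n - buf.length).toNat := by
  intro rest
  induction rest with
  | nil => intro buf; simp [pvA_buf, pvLow]
  | cons c rs ih =>
    intro buf
    rw [pvA_buf]
    by_cases h : (buf.length : Int) < n
    · rw [if_pos h]
      by_cases ha : PySem.Chars.isalnum c = true
      · rw [if_pos ha, ih]
        have h1 : (n - (buf.length : Int)).toNat
            = (n - (((buf ++ [PySem.Chars.lowerChar c]).length : Nat) : Int)).toNat + 1 := by
          simp only [List.length_append, List.length_cons, List.length_nil]
          push_cast; omega
        have h2 : pvLow (c :: rs) = PySem.Chars.lowerChar c :: pvLow rs := by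
          simp [pvLow, List.filter_cons, ha]
        rw [h2, h1, List.take_succ_cons, List.append_assoc]
        simp
      · rw [if_neg ha, ih]
        have h2 : pvLow (c :: rs) = pvLow rs := by simp [pvLow, List.filter_cons, ha]
        rw [h2]
    · rw [if_neg h]
      have h0 : (n - (buf.length : Int)).toNat = 0 := by omega
      simp [h0]

theorem pvPos_append (i : Int) (xs ys : List Char) :
    pvPos i (xs ++ ys) = pvPos i xs ++ pvPos (i + xs.length) ys := by
  induction xs generalizing i with
  | nil => simp [pvPos]
  | cons c xs ih =>
    have harith : i + 1 + (xs.length : Int) = i + ((c :: xs).length : Int) := by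
      push_cast [List.length_cons]; ring
    by_cases ha : PySem.Chars.isalnum c = true <;>
      simp only [List.cons_append, pvPos, ha, Bool.false_eq_true, if_true, if_false, ih, harith]

theorem pvPos_length (i : Int) (xs : List Char) :
    (pvPos i xs).length = (pvLow xs).length := by
  induction xs generalizing i with
  | nil => simp [pvPos, pvLow]
  | cons c xs ih =>
    by_cases ha : PySem.Chars.isalnum c = true
    · rw [show pvPos i (c :: xs) = i :: pvPos (i + 1) xs from by simp [pvPos, ha],
          show pvLow (c :: xs) = PySem.Chars.lowerChar c :: pvLow xs from by
            simp [pvLow, List.filter_cons, ha]]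
      simp [ih]
    · rw [show pvPos i (c :: xs) = pvPos (i + 1) xs from by simp [pvPos, ha],
          show pvLow (c :: xs) = pvLow xs from by simp [pvLow, List.filter_cons, ha]]
      exact ih (i + 1)

theorem pvPos_mem_lt (xs : List Char) : ∀ (i x : Int), x ∈ pvPos i xs → x < i + xs.length := by
  induction xs with
  | nil => intro i x h; simp [pvPos] at h
  | cons c rs ih =>
    intro i x h
    by_cases ha : PySem.Chars.isalnum c = true
    · simp only [pvPos, ha, if_pos, List.mem_cons] at h
      rcases h with h | h
      · simp only [h, List.length_cons]; push_cast; omega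
      · have := ih (i + 1) x h
        simp only [List.length_cons] at *; push_cast at this ⊢; omega
    · simp only [pvPos, ha] at h
      rw [if_neg (by simp [ha])] at h
      have := ih (i + 1) x h
      simp only [List.length_cons] at *; push_cast at this ⊢; omega

theorem pvIdx_eq (cs : List Char) : ∀ (s : Int),
    ((PySem.List.enumerate cs s).filter (fun p => PySem.Chars.isalnum p.2)).map (·.1) = pvPos s cs := by
  induction cs with
  | nil => intro s; simp [PySem.List.enumerate, pvPos]
  | cons c rs ih =>
    intro s
    rw [PySem.List.enumerate_cons]
    by_cases ha : PySem.Chars.isalnum c = true <;>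
      simp [List.filter_cons, ha, pvPos, ih]

theorem pv_master (cs : List Char) (n : Int) (fl : Bool) :
    ∀ (rest pre : List Char) (k : Nat) (tf : PySem.Dict String Int) (posts : List (String × Int)),
      cs = pre ++ rest →
      k = (pvPos 0 pre).length →
      (((pre.length : Int) == 0) || !(pvA_prevAlnum cs (pre.length : Int)))
        = ((k == 0) || !(PySem.List.pyGetD (pvPos 0 cs) ((k : Int) - 1) 0 == (pre.length : Int) - 1)) →
      pvA_loop cs n fl rest (pre.length : Int) tf posts
        = pvB_loop (pvPos 0 cs) (pvLow cs) n fl (pvPos (pre.length : Int) rest) k tf posts := by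
  intro rest
  induction rest with
  | nil => intro pre k tf posts hcs hk hc; simp [pvA_loop, pvPos, pvB_loop]
  | cons c rs ih =>
    intro pre k tf posts hcs hk hc
    have hidx : pvPos 0 cs = pvPos 0 pre ++ pvPos (pre.length : Int) (c :: rs) := by
      rw [hcs, pvPos_append, zero_add]
    have hklen : (pvPos 0 pre).length = k := hk.symm
    have hcs' : cs = (pre ++ [c]) ++ rs := by simp [hcs]
    have hlen' : (((pre ++ [c]).length : Nat) : Int) = (pre.length : Int) + 1 := by
      simp
    by_cases ha : PySem.Chars.isalnum c = true
    · -- c is alphanumeric: B consumes one (k, i) pair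
      have hpos_cons : pvPos (pre.length : Int) (c :: rs)
          = (pre.length : Int) :: pvPos ((pre.length : Int) + 1) rs := by simp [pvPos, ha]
      have hget : PySem.List.pyGet? cs ((pre.length : Int) + 1 - 1) = some c := by
        have h0 : (pre.length : Int) + 1 - 1 = ((pre.length : Nat) : Int) := by ring
        rw [h0, PySem.List.pyGet?_natCast, hcs, List.getElem?_append_right (le_refl _)]
        simp
      have hkidx : (pvPos 0 cs).getD k 0 = (pre.length : Int) := by
        rw [hidx, List.getD_append_right _ _ _ _ (by omega), hpos_cons]
        simp [hklen]
      have hlowsplit : pvLow cs = pvLow pre ++ (PySem.Chars.lowerChar c :: pvLow rs) := by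
        rw [hcs]; simp [pvLow, List.filter_cons, ha]
      have hlowlen : (pvLow pre).length = k := by rw [← pvPos_length 0 pre]; exact hklen
      have hdrop : (pvLow cs).drop (k + 1) = pvLow rs := by
        rw [hlowsplit, List.drop_append]
        have h1 : (pvLow pre).drop (k + 1) = [] :=
          List.drop_eq_nil_of_le (by omega)
        rw [h1, hlowlen]
        simp
      have hbufA : pvA_buf n rs [] = (pvLow rs).take n.toNat := by
        rw [pvA_buf_eq]; simp
      have hbufB : PySem.List.slice (pvLow cs) (some ((k : Int) + 1)) (some ((k : Int) + 1 + max n 0))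
          = (pvLow rs).take n.toNat := by
        rw [PySem.List.slice_toNat _ (by omega) (by have := le_max_right n 0; omega)]
        have e1 : ((k : Int) + 1).toNat = k + 1 := by omega
        have e2 : ((k : Int) + 1 + max n 0).toNat - (k + 1) = n.toNat := by
          rcases le_total n 0 with h | h
          · rw [max_eq_right h]; omega
          · rw [max_eq_left h]; omega
        rw [e1, e2, hdrop]
      -- next-step condition: previous char is c, alnum, so both sides are false
      have hc' : ((((pre ++ [c]).length : Nat) : Int) == 0
              || !(pvA_prevAlnum cs (((pre ++ [c]).length : Nat) : Int)))
          = (((k + 1 : Nat) == 0)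
              || !(PySem.List.pyGetD (pvPos 0 cs) (((k + 1 : Nat) : Int) - 1) 0
                    == (((pre ++ [c]).length : Nat) : Int) - 1)) := by
        rw [hlen']
        have hL : ((pre.length : Int) + 1 == 0) = false := by
          simp only [beq_eq_false_iff_ne, ne_eq]; omega
        have hprev : pvA_prevAlnum cs ((pre.length : Int) + 1) = true := by
          unfold pvA_prevAlnum; rw [hget]; exact ha
        have hidx2 : (((k + 1 : Nat) : Int) - 1) = ((k : Nat) : Int) := by push_cast; ring
        have harg : (pre.length : Int) + 1 - 1 = (pre.length : Int) := by ring
        rw [hL, hprev, hidx2, PySem.List.pyGetD_natCast, hkidx, harg]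
        simp
      rw [hpos_cons]
      simp only [pvA_loop, pvB_loop, ha, Bool.true_and, hbufA, hbufB]
      rw [Bool.or_assoc, Bool.or_assoc, hc]
      split_ifs with h1 h2
      · rw [show (pre.length : Int) + 1 = (((pre ++ [c]).length : Nat) : Int) from hlen'.symm]
        exact ih (pre ++ [c]) (k + 1) _ _ hcs'
          (by rw [pvPos_append]; simp [pvPos, ha, hklen]) hc'
      · rw [show (pre.length : Int) + 1 = (((pre ++ [c]).length : Nat) : Int) from hlen'.symm]
        exact ih (pre ++ [c]) (k + 1) _ _ hcs'
          (by rw [pvPos_append]; simp [pvPos, ha, hklen]) hc'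
      · rw [show (pre.length : Int) + 1 = (((pre ++ [c]).length : Nat) : Int) from hlen'.symm]
        exact ih (pre ++ [c]) (k + 1) _ _ hcs'
          (by rw [pvPos_append]; simp [pvPos, ha, hklen]) hc'
    · -- c is not alphanumeric: A skips it, B's remaining pair list is unchanged
      have hpos_skip : pvPos (pre.length : Int) (c :: rs)
          = pvPos ((pre.length : Int) + 1) rs := by simp [pvPos, ha]
      have hget : PySem.List.pyGet? cs ((pre.length : Int) + 1 - 1) = some c := by
        have h0 : (pre.length : Int) + 1 - 1 = ((pre.length : Nat) : Int) := by ring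
        rw [h0, PySem.List.pyGet?_natCast, hcs, List.getElem?_append_right (le_refl _)]
        simp
      have hc' : ((((pre ++ [c]).length : Nat) : Int) == 0
              || !(pvA_prevAlnum cs (((pre ++ [c]).length : Nat) : Int)))
          = (((k : Nat) == 0)
              || !(PySem.List.pyGetD (pvPos 0 cs) (((k : Nat) : Int) - 1) 0
                    == (((pre ++ [c]).length : Nat) : Int) - 1)) := by
        rw [hlen']
        have hprev : pvA_prevAlnum cs ((pre.length : Int) + 1) = false := by
          unfold pvA_prevAlnum; rw [hget]; simpa using ha
        rw [hprev]
        have hR : (((k : Nat) == 0)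
            || !(PySem.List.pyGetD (pvPos 0 cs) (((k : Nat) : Int) - 1) 0
                  == (pre.length : Int) + 1 - 1)) = true := by
          match k, hklen with
          | 0, _ => simp
          | (m + 1), hklen =>
            have hm : (((m + 1 : Nat) : Int) - 1) = ((m : Nat) : Int) := by push_cast; ring
            rw [hm, PySem.List.pyGetD_natCast]
            have hmem : (pvPos 0 cs).getD m 0 ∈ pvPos 0 pre := by
              rw [hidx, List.getD_append _ _ _ _ (by omega),
                List.getD_eq_getElem _ _ (by omega)]
              exact List.getElem_mem _
            have hlt := pvPos_mem_lt pre 0 _ hmem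
            have hne : ((pvPos 0 cs).getD m 0 == (pre.length : Int) + 1 - 1) = false := by
              simp only [beq_eq_false_iff_ne, ne_eq]; omega
            rw [hne]
            simp
        rw [hR]
        simp
      rw [hpos_skip]
      simp only [pvA_loop, ha, Bool.false_and, if_neg (by simp : ¬ (false = true))]
      rw [show (pre.length : Int) + 1 = (((pre ++ [c]).length : Nat) : Int) from hlen'.symm]
      exact ih (pre ++ [c]) k _ _ hcs'
        (by rw [pvPos_append]; simp [pvPos, ha, hklen]) hc'

-- ===== VERDICT (by name: the statement is the Claim_ definition above) =====
theorem getPostings_spec : Claim_equal_getPostings := by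
  intro text n fl _
  show getPostings text n fl = getPostings_alt text n fl
  have h : pvA_loop text.toList n fl text.toList 0 PySem.Dict.empty []
      = pvB_loop (pvPos 0 text.toList) (pvLow text.toList) n fl (pvPos 0 text.toList) 0
          PySem.Dict.empty [] := by
    simpa using pv_master text.toList n fl text.toList [] 0 PySem.Dict.empty [] rfl rfl (by simp)
  simp only [getPostings, getPostings_alt, pvIdx_eq]
  rw [show (List.filter (fun c => PySem.Chars.isalnum c) text.toList).map PySem.Chars.lowerChar
      = pvLow text.toList from rfl, h]
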